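-- pv_equiv track=rewrite | github.com/CherryQqqqq5/ToolClaw | scripts/run_toolsandbox_bench.py | _query_is_natural_language
-- ===== SOURCE A (Python) =====
-- from typing import Any, Dict, List
--
-- def _query_is_natural_language(query: Any, sample_id: str) -> bool:
--     normalized_query = str(query or "").strip()
--     normalized_sample_id = str(sample_id).strip()
--     if not normalized_query:
--         return False
--     if normalized_query == normalized_sample_id:
--         return False
--     return (" " in normalized_query) or any(char in normalized_query for char in "?!.:,;'\"")
-- ===== SOURCE B (Python) =====
-- SPECIAL = set(" ?!.:,;'\"")
--
--
-- def _query_is_natural_language(query, sample_id):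
--     normalized_query = str(query or "").strip()
--     normalized_sample_id = str(sample_id).strip()
--     if not normalized_query:
--         return False
--     if normalized_query == normalized_sample_id:
--         return False
--     return any(ch in SPECIAL for ch in normalized_query)
-- ===== Notes on version B (the rewrite author's own statement) =====
-- stated objective: idiomatic
-- what changed: Replaces A's space test OR'd with eight separate full-string substring scans (one per punctuation mark) by a single pass over the query's characters testing membership in one precomputed set of the nine special characters.
import Mathlib
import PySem

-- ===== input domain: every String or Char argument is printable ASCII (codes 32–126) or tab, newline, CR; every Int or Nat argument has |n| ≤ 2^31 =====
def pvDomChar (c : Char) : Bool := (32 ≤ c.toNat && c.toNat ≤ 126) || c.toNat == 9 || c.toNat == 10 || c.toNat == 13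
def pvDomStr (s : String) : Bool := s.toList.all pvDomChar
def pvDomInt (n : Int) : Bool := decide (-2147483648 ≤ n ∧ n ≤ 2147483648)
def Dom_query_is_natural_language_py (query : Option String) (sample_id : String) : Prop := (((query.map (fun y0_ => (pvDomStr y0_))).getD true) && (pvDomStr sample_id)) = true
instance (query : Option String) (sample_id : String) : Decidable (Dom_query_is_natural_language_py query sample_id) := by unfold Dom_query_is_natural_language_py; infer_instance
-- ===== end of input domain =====

-- B replaces A's space test OR'd with eight per-punctuation substring scans by one pass over the
-- query's characters testing membership in a single precomputed set (same guards, same result).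
-- ===== PORT A =====
def query_is_natural_language_py (query : Option String) (sample_id : String) : Bool :=
  let normalized_query := PySem.Str.strip (query.getD "")
  let normalized_sample_id := PySem.Str.strip sample_id
  if normalized_query = "" then false
  else if normalized_query = normalized_sample_id then false
  else (PySem.Str.isIn " " normalized_query) ||
    (("?!.:,;'\"" : String).toList.any
      (fun c => PySem.Str.isIn (String.ofList [c]) normalized_query))

-- ===== PORT B =====
def pvSpecialChars : PySem.Set Char := PySem.Set.ofList (" ?!.:,;'\"" : String).toList

def query_is_natural_language_py_alt (query : Option String) (sample_id : String) : Bool :=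
  let normalized_query := PySem.Str.strip (query.getD "")
  let normalized_sample_id := PySem.Str.strip sample_id
  if normalized_query = "" then false
  else if normalized_query = normalized_sample_id then false
  else normalized_query.toList.any (fun ch => PySem.Set.contains pvSpecialChars ch)

-- ===== PRECONDITION & SPEC =====
def Spec_query_is_natural_language_py (query : Option String) (sample_id : String) (out : Bool) : Prop := out = query_is_natural_language_py_alt query sample_id
instance (query : Option String) (sample_id : String) (out : Bool) : Decidable (Spec_query_is_natural_language_py query sample_id out) := by unfold Spec_query_is_natural_language_py; infer_instance

-- ===== CLAIM (what is proved, stated in full; the proofs are below) =====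
def Claim_equal_query_is_natural_language_py : Prop := ∀ (query : Option String) (sample_id : String), Dom_query_is_natural_language_py query sample_id → Spec_query_is_natural_language_py query sample_id (query_is_natural_language_py query sample_id)

-- ===== LEMMAS AND PROOFS =====
theorem isIn_singleton (c : Char) (s : String) :
    PySem.Str.isIn (String.ofList [c]) s = s.toList.contains c := by
  rw [Bool.eq_iff_iff]
  have h : (String.ofList [c]).toList = [c] := by simp
  rw [PySem.Str.isIn_iff_infix, h, List.singleton_infix_iff]
  simp

theorem final_expr_eq (s : String) :
    ((PySem.Str.isIn " " s) ||
      (("?!.:,;'\"" : String).toList.any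
        (fun c => PySem.Str.isIn (String.ofList [c]) s))) =
    s.toList.any (fun ch => PySem.Set.contains pvSpecialChars ch) := by
  rw [Bool.eq_iff_iff]
  simp only [isIn_singleton, Bool.or_eq_true, List.any_eq_true, List.contains_eq_mem,
    decide_eq_true_eq, PySem.Set.contains_iff, PySem.Set.mem_ofList, pvSpecialChars]
  have h2 : (" " : String).toList = [' '] := rfl
  have h8 : ("?!.:,;'\"" : String).toList = ['?','!','.',':',',',';','\'','"'] := rfl
  have h9 : (" ?!.:,;'\"" : String).toList = [' ','?','!','.',':',',',';','\'','"'] := rfl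
  rw [PySem.Str.isIn_iff_infix, h2, List.singleton_infix_iff, h8, h9]
  simp only [List.mem_cons, List.not_mem_nil, or_false, exists_eq_or_imp, exists_eq_left]
  constructor
  · rintro (h|h|h|h|h|h|h|h|h) <;> exact ⟨_, h, by simp⟩
  · rintro ⟨x, hx, (rfl|rfl|rfl|rfl|rfl|rfl|rfl|rfl|rfl)⟩ <;> tauto

-- ===== VERDICT (by name: the statement is the Claim_ definition above) =====
theorem query_is_natural_language_py_spec : Claim_equal_query_is_natural_language_py := by
  intro query sample_id _
  unfold Spec_query_is_natural_language_py query_is_natural_language_py query_is_natural_language_py_alt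
  by_cases h1 : PySem.Str.strip (query.getD "") = ""
  · simp [h1]
  · by_cases h2 : PySem.Str.strip (query.getD "") = PySem.Str.strip sample_id
    · simp [h2]
    · simp only [h1, h2, if_false]
      exact final_expr_eq _
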